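-- pv_equiv track=rewrite | github.com/pypi-data/pypi-code-100 | ciomax/ciomax-0.4.0-py2.py3-none-any.whl/render_scope.py | all_software_paths
-- ===== SOURCE A (Python) =====
-- def all_software_paths(path):
--     path = path.split("(")[0].strip()
--     result = []
--     while True:
--         result.append(path)
--         parts = path.partition("/")
--         if not parts[1]:
--             return result
--         path = parts[0]
-- ===== SOURCE B (Python) =====
-- def all_software_paths(path):
--     path = path.split("(")[0].strip()
--     if "/" in path:
--         return [path, path.split("/")[0]]
--     return [path]
-- ===== Notes on version B (the rewrite author's own statement) =====
-- stated objective: simpler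
-- what changed: A's while-True loop that repeatedly appends and re-partitions the path is replaced by a closed form: one slash-membership test selecting either the one-element list or the path plus its prefix before the first slash.
import Mathlib
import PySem

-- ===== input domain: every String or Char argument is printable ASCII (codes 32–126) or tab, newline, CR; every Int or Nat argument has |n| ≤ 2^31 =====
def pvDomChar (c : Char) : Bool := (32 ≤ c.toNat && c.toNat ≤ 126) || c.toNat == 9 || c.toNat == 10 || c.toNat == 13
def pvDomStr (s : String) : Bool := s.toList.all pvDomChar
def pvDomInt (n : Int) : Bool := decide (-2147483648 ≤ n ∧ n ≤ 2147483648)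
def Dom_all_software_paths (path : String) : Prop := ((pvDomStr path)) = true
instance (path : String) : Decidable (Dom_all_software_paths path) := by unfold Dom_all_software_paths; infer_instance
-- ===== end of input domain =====

-- B replaces A's while-True accumulator loop by a direct closed form (one `in` test, one split); objective: simpler.

-- ===== PORT A =====

-- [0] on the result of split (which is always nonempty, so the [] arm is unreachable)
def firstPiece (pieces : List (List Char)) : List Char :=
  match pieces with
  | x :: _ => x
  | [] => []

-- hand port of str.partition (PySem has none); exact for a nonempty sep:
-- Python finds the first occurrence of sep, returning (before, sep, after), or (s, '', '') if absent.
def pyPartition (cs sep : List Char) : List Char × List Char × List Char :=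
  let i := PySem.Chars.find cs sep
  if i = -1 then (cs, [], [])
  else (cs.take i.toNat, sep, cs.drop (i.toNat + sep.length))

-- the next four lemmas characterise find/partition on the one-char separator '/';
-- the port's while-loop cites partition_fst_lt for termination
theorem find_go_slash (cs : List Char) (k : Nat) :
    PySem.Chars.find.go ['/'] cs k =
      (if '/' ∈ cs then ((k : Int) + (cs.takeWhile (· ≠ '/')).length) else -1) := by
  induction cs generalizing k with
  | nil => simp [PySem.Chars.find.go]
  | cons c rest ih =>
    have hpfx : (['/'].isPrefixOf (c :: rest)) = decide (c = '/') := by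
      by_cases hcc : c = '/'
      · simp [List.isPrefixOf, hcc]
      · have hcc' : ('/' : Char) ≠ c := fun e => hcc e.symm
        simp [List.isPrefixOf, hcc, hcc']
    by_cases hc : c = '/'
    · subst hc
      simp only [PySem.Chars.find.go, hpfx]
      simp [List.takeWhile]
    · simp only [PySem.Chars.find.go, hpfx, hc, decide_false, Bool.false_eq_true, if_false]
      rw [ih]
      by_cases hm : '/' ∈ rest
      · have hm' : '/' ∈ c :: rest := List.mem_cons_of_mem _ hm
        rw [if_pos hm, if_pos hm']
        simp [List.takeWhile, hc]
        ring
      · have hm' : '/' ∉ c :: rest := by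
          simp [List.mem_cons, hm]
          exact fun h => hc h.symm
        rw [if_neg hm, if_neg hm']

theorem find_slash (cs : List Char) :
    PySem.Chars.find cs ['/'] =
      (if '/' ∈ cs then ((cs.takeWhile (· ≠ '/')).length : Int) else -1) := by
  unfold PySem.Chars.find
  rw [find_go_slash]
  split_ifs <;> simp

theorem takeWhile_len_lt (cs : List Char) (h : '/' ∈ cs) :
    (cs.takeWhile (· ≠ '/')).length < cs.length := by
  have hne : cs.takeWhile (· ≠ '/') ≠ cs := by
    intro he
    have := List.mem_takeWhile_imp (l := cs) (p := (· ≠ '/')) (he ▸ h)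
    simp at this
  have hpfx : cs.takeWhile (· ≠ '/') <+: cs := List.takeWhile_prefix _
  rcases lt_or_eq_of_le hpfx.length_le with h' | h'
  · exact h'
  · exact absurd (List.IsPrefix.eq_of_length hpfx h') hne

theorem partition_slash (cs : List Char) (h : '/' ∈ cs) :
    pyPartition cs ['/'] =
      (cs.takeWhile (· ≠ '/'), ['/'],
        cs.drop ((cs.takeWhile (· ≠ '/')).length + 1)) := by
  unfold pyPartition
  rw [find_slash, if_pos h,
    if_neg (show ((cs.takeWhile (· ≠ '/')).length : Int) ≠ -1 by omega)]
  have hp : cs.takeWhile (· ≠ '/') <+: cs := List.takeWhile_prefix _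
  rw [Prod.mk.injEq, Prod.mk.injEq]
  refine ⟨?_, rfl, by simp⟩
  simp only [Int.toNat_natCast]
  exact (List.prefix_iff_eq_take.mp hp).symm

theorem partition_fst_lt (cs : List Char)
    (h : ¬ (pyPartition cs ['/']).2.1 = []) :
    (pyPartition cs ['/']).1.length < cs.length := by
  by_cases hm : '/' ∈ cs
  · rw [partition_slash cs hm]
    exact takeWhile_len_lt cs hm
  · exfalso
    apply h
    unfold pyPartition
    rw [find_slash, if_neg hm]
    simp

-- the while-True loop of A, transliterated: append path, partition on '/',
-- return when the separator component is empty, else continue with the prefix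
def aLoop (cs : List Char) (result : List String) : List String :=
  let result := result ++ [String.ofList cs]
  let parts := pyPartition cs ['/']
  if h : parts.2.1 = [] then result
  else aLoop parts.1 result
termination_by cs.length
decreasing_by exact partition_fst_lt cs h


def all_software_paths (path : String) : List String :=
  aLoop (PySem.Chars.strip (firstPiece (PySem.Chars.splitOn path.toList ['(']))) []

-- ===== PORT B =====
def all_software_paths_alt (path : String) : List String :=
  let cs := PySem.Chars.strip (firstPiece (PySem.Chars.splitOn path.toList ['(']))
  if PySem.Chars.isIn ['/'] cs then
    [String.ofList cs, String.ofList (firstPiece (PySem.Chars.splitOn cs ['/']))]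
  else [String.ofList cs]

-- ===== PRECONDITION & SPEC =====
def Spec_all_software_paths (path : String) (out : List String) : Prop := out = all_software_paths_alt path
instance (path : String) (out : List String) : Decidable (Spec_all_software_paths path out) := by unfold Spec_all_software_paths; infer_instance

-- ===== CLAIM (what is proved, stated in full; the proofs are below) =====
def Claim_equal_all_software_paths : Prop := ∀ (path : String), Dom_all_software_paths path → Spec_all_software_paths path (all_software_paths path)

-- ===== LEMMAS AND PROOFS =====

-- once the accumulator is nonempty, the head of splitOn.go's result is its last element
theorem splitOn_go_acc (fuel : Nat) (cs cur : List Char) (acc : List (List Char)) (a : List Char)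
    (h : acc.getLast? = some a) :
    (PySem.Chars.splitOn.go ['/'] fuel cs cur acc).head? = some a := by
  induction fuel generalizing cs cur acc with
  | zero =>
    simp only [PySem.Chars.splitOn.go, List.head?_reverse]
    cases acc with
    | nil => simp at h
    | cons b bs => rw [List.getLast?_cons_cons]; exact h
  | succ fuel ih =>
    cases cs with
    | nil =>
      simp only [PySem.Chars.splitOn.go, List.head?_reverse]
      cases acc with
      | nil => simp at h
      | cons b bs => rw [List.getLast?_cons_cons]; exact h
    | cons c rest =>
      simp only [PySem.Chars.splitOn.go]
      split
      · apply ih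
        cases acc with
        | nil => simp at h
        | cons b bs => rw [List.getLast?_cons_cons]; exact h
      · exact ih _ _ _ h

theorem splitOn_go_head (cs : List Char) (fuel : Nat) (cur : List Char)
    (hf : cs.length < fuel) :
    (PySem.Chars.splitOn.go ['/'] fuel cs cur []).head? =
      some (cur.reverse ++ cs.takeWhile (· ≠ '/')) := by
  induction cs generalizing fuel cur with
  | nil =>
    cases fuel with
    | zero => omega
    | succ fuel => simp [PySem.Chars.splitOn.go]
  | cons c rest ih =>
    cases fuel with
    | zero => omega
    | succ fuel =>
      have hpfx : (['/'].isPrefixOf (c :: rest)) = decide (c = '/') := by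
        by_cases hcc : c = '/'
        · simp [List.isPrefixOf, hcc]
        · have hcc' : ('/' : Char) ≠ c := fun e => hcc e.symm
          simp [List.isPrefixOf, hcc, hcc']
      by_cases hc : c = '/'
      · subst hc
        simp only [PySem.Chars.splitOn.go, hpfx, decide_true, if_true]
        rw [splitOn_go_acc _ _ _ _ cur.reverse (by simp)]
        simp [List.takeWhile]
      · simp only [PySem.Chars.splitOn.go, hpfx, hc, decide_false, Bool.false_eq_true, if_false]
        rw [ih fuel (c :: cur) (by simp at hf ⊢; omega)]
        simp [List.takeWhile, hc]

theorem splitOn_slash_head (cs : List Char) :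
    firstPiece (PySem.Chars.splitOn cs ['/']) = cs.takeWhile (· ≠ '/') := by
  have h := splitOn_go_head cs (cs.length + 1) [] (by omega)
  unfold PySem.Chars.splitOn firstPiece
  revert h
  cases PySem.Chars.splitOn.go ['/'] (cs.length + 1) cs [] [] with
  | nil => simp
  | cons x xs => simp_all

theorem takeWhile_no_slash (cs : List Char) : '/' ∉ cs.takeWhile (· ≠ '/') := by
  intro h
  have := List.mem_takeWhile_imp h
  simp at this

theorem partition_no_slash (cs : List Char) (h : '/' ∉ cs) :
    (pyPartition cs ['/']).2.1 = [] := by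
  unfold pyPartition
  rw [find_slash, if_neg h]
  simp

theorem aLoop_no_slash (cs : List Char) (res : List String) (h : '/' ∉ cs) :
    aLoop cs res = res ++ [String.ofList cs] := by
  rw [aLoop]
  simp [partition_no_slash cs h]

theorem aLoop_slash (cs : List Char) (res : List String) (h : '/' ∈ cs) :
    aLoop cs res = res ++ [String.ofList cs, String.ofList (cs.takeWhile (· ≠ '/'))] := by
  rw [aLoop]
  simp only [partition_slash cs h]
  rw [dif_neg (by simp)]
  rw [aLoop_no_slash _ _ (takeWhile_no_slash cs)]
  simp

theorem isIn_slash (cs : List Char) :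
    PySem.Chars.isIn ['/'] cs = decide ('/' ∈ cs) := by
  unfold PySem.Chars.isIn
  rw [find_slash]
  by_cases h : '/' ∈ cs
  · rw [if_pos h]
    simp only [h, decide_true, bne_iff_ne, ne_eq]
    omega
  · rw [if_neg h]
    simp [h]

theorem main_eq (cs : List Char) :
    aLoop cs [] =
      (if PySem.Chars.isIn ['/'] cs then
        [String.ofList cs, String.ofList (firstPiece (PySem.Chars.splitOn cs ['/']))]
      else [String.ofList cs]) := by
  rw [isIn_slash, splitOn_slash_head]
  by_cases h : '/' ∈ cs
  · rw [aLoop_slash cs [] h]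
    simp [h]
  · rw [aLoop_no_slash cs [] h]
    simp [h]

-- ===== VERDICT (by name: the statement is the Claim_ definition above) =====
theorem all_software_paths_spec : Claim_equal_all_software_paths := by
  intro path _
  unfold Spec_all_software_paths all_software_paths all_software_paths_alt
  exact main_eq _
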